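-- pv_equiv track=rewrite | github.com/OrgPele/envctl | scripts/python_cleanup.py | _best_source_test_dir
-- ===== SOURCE A (Python) =====
-- from typing import Final
--
-- SOURCE_TEST_DIR_MAP: Final[dict[str, str]] = {
--     "python/envctl_engine/actions": "tests/python/actions",
--     "python/envctl_engine/config": "tests/python/config",
--     "python/envctl_engine/debug": "tests/python/debug",
--     "python/envctl_engine/planning": "tests/python/planning",
--     "python/envctl_engine/requirements": "tests/python/requirements",
--     "python/envctl_engine/runtime": "tests/python/runtime",
--     "python/envctl_engine/shared": "tests/python/shared",
--     "python/envctl_engine/shell": "tests/python/shell",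
--     "python/envctl_engine/startup": "tests/python/startup",
--     "python/envctl_engine/state": "tests/python/state",
--     "python/envctl_engine/test_output": "tests/python/test_output",
--     "python/envctl_engine/ui": "tests/python/ui",
--     "python/envctl_engine": "tests/python",
--     "python": "tests/python",
-- }
--
-- def _best_source_test_dir(relative_path: str) -> str:
--     matches = [
--         source
--         for source in SOURCE_TEST_DIR_MAP
--         if relative_path == source or relative_path.startswith(source + "/")
--     ]
--     if not matches:
--         return "tests/python"
--     best = max(matches, key=len)
--     return SOURCE_TEST_DIR_MAP[best]
-- ===== SOURCE B (Python) =====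
-- SOURCE_TEST_DIR_MAP = {
--     "python/envctl_engine/actions": "tests/python/actions",
--     "python/envctl_engine/config": "tests/python/config",
--     "python/envctl_engine/debug": "tests/python/debug",
--     "python/envctl_engine/planning": "tests/python/planning",
--     "python/envctl_engine/requirements": "tests/python/requirements",
--     "python/envctl_engine/runtime": "tests/python/runtime",
--     "python/envctl_engine/shared": "tests/python/shared",
--     "python/envctl_engine/shell": "tests/python/shell",
--     "python/envctl_engine/startup": "tests/python/startup",
--     "python/envctl_engine/state": "tests/python/state",
--     "python/envctl_engine/test_output": "tests/python/test_output",
--     "python/envctl_engine/ui": "tests/python/ui",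
--     "python/envctl_engine": "tests/python",
--     "python": "tests/python",
-- }
--
-- # Entries sorted once, longest source first; the first match is the best match.
-- _ITEMS_BY_LEN = sorted(SOURCE_TEST_DIR_MAP.items(), key=lambda item: len(item[0]), reverse=True)
--
--
-- def _best_source_test_dir(relative_path: str) -> str:
--     for source, target in _ITEMS_BY_LEN:
--         if relative_path == source or relative_path.startswith(source + "/"):
--             return target
--     return "tests/python"
-- ===== Notes on version B (the rewrite author's own statement) =====
-- stated objective: idiomatic
-- what changed: Instead of filtering all map keys into a matches list, scanning it again with max(key=len) and doing a final dict lookup, B pre-sorts the (source, target) items once by source length descending and returns the target of the first matching source in a single early-return scan.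
import Mathlib
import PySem

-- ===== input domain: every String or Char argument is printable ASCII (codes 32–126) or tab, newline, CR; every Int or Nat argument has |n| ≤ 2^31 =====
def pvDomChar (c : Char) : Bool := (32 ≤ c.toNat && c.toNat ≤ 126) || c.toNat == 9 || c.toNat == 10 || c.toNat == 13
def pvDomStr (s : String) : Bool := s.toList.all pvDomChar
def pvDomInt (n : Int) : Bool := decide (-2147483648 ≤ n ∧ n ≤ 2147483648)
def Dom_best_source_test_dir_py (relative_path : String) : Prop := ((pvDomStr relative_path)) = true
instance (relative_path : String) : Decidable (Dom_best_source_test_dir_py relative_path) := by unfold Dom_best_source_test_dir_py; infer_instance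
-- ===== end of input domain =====

-- B replaces A's filter-all-keys / max-by-length / final dict lookup by a single early-return
-- scan over the (source, target) pairs pre-sorted once by source length descending (idiomatic).

-- ===== PORT A =====
-- SOURCE_TEST_DIR_MAP as a PySem.Dict (insertion order)
def pvItems : List (String × String) := [("python/envctl_engine/actions", "tests/python/actions"),
    ("python/envctl_engine/config", "tests/python/config"),
    ("python/envctl_engine/debug", "tests/python/debug"),
    ("python/envctl_engine/planning", "tests/python/planning"),
    ("python/envctl_engine/requirements", "tests/python/requirements"),
    ("python/envctl_engine/runtime", "tests/python/runtime"),
    ("python/envctl_engine/shared", "tests/python/shared"),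
    ("python/envctl_engine/shell", "tests/python/shell"),
    ("python/envctl_engine/startup", "tests/python/startup"),
    ("python/envctl_engine/state", "tests/python/state"),
    ("python/envctl_engine/test_output", "tests/python/test_output"),
    ("python/envctl_engine/ui", "tests/python/ui"),
    ("python/envctl_engine", "tests/python"),
    ("python", "tests/python")]

def pvMap : PySem.Dict String String := PySem.Dict.ofList pvItems

-- relative_path == source or relative_path.startswith(source + "/")
-- (PySem.Str.join "" [a, b] is Python's a + b on strings)
def pvMatch (relative_path source : String) : Bool :=
  relative_path == source ||
    PySem.Str.startswith relative_path (PySem.Str.join "" [source, "/"])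

def best_source_test_dir_py (relative_path : String) : String :=
  let ms := (PySem.Dict.keys pvMap).filter (fun source => pvMatch relative_path source)
  if ms.isEmpty then "tests/python"
  else
    match PySem.List.max? ms (fun s => PySem.Str.len s) with
    | some best =>
      match PySem.Dict.get? pvMap best with
      | some v => v
      | none => "tests/python"   -- KeyError in Python; unreachable (best is drawn from the keys)
    | none => "tests/python"     -- max() on empty; unreachable (guarded by the isEmpty test)

-- ===== PORT B =====
-- _ITEMS_BY_LEN = sorted(SOURCE_TEST_DIR_MAP.items(), key=lambda item: len(item[0]), reverse=True)
def pvItemsByLen : List (String × String) :=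
  PySem.List.sorted pvItems (fun item => PySem.Str.len item.1) true

-- the for-loop with early return
def pvFirstMatch (relative_path : String) : List (String × String) → String
  | [] => "tests/python"
  | (source, target) :: rest =>
    if pvMatch relative_path source then target else pvFirstMatch relative_path rest

def best_source_test_dir_py_alt (relative_path : String) : String :=
  pvFirstMatch relative_path pvItemsByLen

-- ===== PRECONDITION & SPEC =====
def Spec_best_source_test_dir_py (relative_path : String) (out : String) : Prop := out = best_source_test_dir_py_alt relative_path
instance (relative_path : String) (out : String) : Decidable (Spec_best_source_test_dir_py relative_path out) := by unfold Spec_best_source_test_dir_py; infer_instance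

-- ===== CLAIM (what is proved, stated in full; the proofs are below) =====
def Claim_equal_best_source_test_dir_py : Prop := ∀ (relative_path : String), Dom_best_source_test_dir_py relative_path → Spec_best_source_test_dir_py relative_path (best_source_test_dir_py relative_path)

-- ===== LEMMAS AND PROOFS =====

-- A's body with the 14 match tests abstracted into booleans (one per key, in dict order)
def pvFA (b1 b2 b3 b4 b5 b6 b7 b8 b9 b10 b11 b12 b13 b14 : Bool) : String :=
  let ms := (if b1 then ["python/envctl_engine/actions"] else []) ++ (if b2 then ["python/envctl_engine/config"] else []) ++ (if b3 then ["python/envctl_engine/debug"] else []) ++ (if b4 then ["python/envctl_engine/planning"] else []) ++ (if b5 then ["python/envctl_engine/requirements"] else []) ++ (if b6 then ["python/envctl_engine/runtime"] else []) ++ (if b7 then ["python/envctl_engine/shared"] else []) ++ (if b8 then ["python/envctl_engine/shell"] else []) ++ (if b9 then ["python/envctl_engine/startup"] else []) ++ (if b10 then ["python/envctl_engine/state"] else []) ++ (if b11 then ["python/envctl_engine/test_output"] else []) ++ (if b12 then ["python/envctl_engine/ui"] else []) ++ (if b13 then ["python/envctl_engine"] else []) ++ (if b14 then ["python"] else [])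
  if ms.isEmpty then "tests/python"
  else
    match PySem.List.max? ms (fun s => PySem.Str.len s) with
    | some best =>
      match PySem.Dict.get? pvMap best with
      | some v => v
      | none => "tests/python"
    | none => "tests/python"

-- B's body with the same booleans (keys visited in length-descending sorted order)
def pvFB (b1 b2 b3 b4 b5 b6 b7 b8 b9 b10 b11 b12 b13 b14 : Bool) : String :=
  if b5 then "tests/python/requirements" else
  if b11 then "tests/python/test_output" else
  if b4 then "tests/python/planning" else
  if b1 then "tests/python/actions" else
  if b6 then "tests/python/runtime" else
  if b9 then "tests/python/startup" else
  if b2 then "tests/python/config" else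
  if b7 then "tests/python/shared" else
  if b3 then "tests/python/debug" else
  if b8 then "tests/python/shell" else
  if b10 then "tests/python/state" else
  if b12 then "tests/python/ui" else
  if b13 then "tests/python" else
  if b14 then "tests/python" else
  "tests/python"

theorem pvFilter_cons (p : String → Bool) (x : String) (l : List String) :
    List.filter p (x :: l) = (if p x then [x] else []) ++ List.filter p l := by
  cases hp : p x <;> simp [List.filter, hp]

theorem pvKeyLemma : ∀ (b1 b2 b3 b4 b5 b6 b7 b8 b9 b10 b11 b12 b13 b14 : Bool), pvFA b1 b2 b3 b4 b5 b6 b7 b8 b9 b10 b11 b12 b13 b14 = pvFB b1 b2 b3 b4 b5 b6 b7 b8 b9 b10 b11 b12 b13 b14 := by decide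

theorem pvSorted_eq : pvItemsByLen = [("python/envctl_engine/requirements", "tests/python/requirements"),
    ("python/envctl_engine/test_output", "tests/python/test_output"),
    ("python/envctl_engine/planning", "tests/python/planning"),
    ("python/envctl_engine/actions", "tests/python/actions"),
    ("python/envctl_engine/runtime", "tests/python/runtime"),
    ("python/envctl_engine/startup", "tests/python/startup"),
    ("python/envctl_engine/config", "tests/python/config"),
    ("python/envctl_engine/shared", "tests/python/shared"),
    ("python/envctl_engine/debug", "tests/python/debug"),
    ("python/envctl_engine/shell", "tests/python/shell"),
    ("python/envctl_engine/state", "tests/python/state"),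
    ("python/envctl_engine/ui", "tests/python/ui"),
    ("python/envctl_engine", "tests/python"),
    ("python", "tests/python")] := by decide

theorem pvKeys_eq : PySem.Dict.keys pvMap = ["python/envctl_engine/actions", "python/envctl_engine/config", "python/envctl_engine/debug", "python/envctl_engine/planning", "python/envctl_engine/requirements", "python/envctl_engine/runtime", "python/envctl_engine/shared", "python/envctl_engine/shell", "python/envctl_engine/startup", "python/envctl_engine/state", "python/envctl_engine/test_output", "python/envctl_engine/ui", "python/envctl_engine", "python"] := by decide

theorem pvA_eq (rp : String) :
    best_source_test_dir_py rp = pvFA (pvMatch rp "python/envctl_engine/actions") (pvMatch rp "python/envctl_engine/config") (pvMatch rp "python/envctl_engine/debug") (pvMatch rp "python/envctl_engine/planning") (pvMatch rp "python/envctl_engine/requirements") (pvMatch rp "python/envctl_engine/runtime") (pvMatch rp "python/envctl_engine/shared") (pvMatch rp "python/envctl_engine/shell") (pvMatch rp "python/envctl_engine/startup") (pvMatch rp "python/envctl_engine/state") (pvMatch rp "python/envctl_engine/test_output") (pvMatch rp "python/envctl_engine/ui") (pvMatch rp "python/envctl_engine") (pvMatch rp "python") := by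
  unfold best_source_test_dir_py pvFA
  rw [pvKeys_eq]
  simp only [pvFilter_cons, List.filter_nil, List.append_assoc, List.append_nil]

theorem pvB_eq (rp : String) :
    best_source_test_dir_py_alt rp = pvFB (pvMatch rp "python/envctl_engine/actions") (pvMatch rp "python/envctl_engine/config") (pvMatch rp "python/envctl_engine/debug") (pvMatch rp "python/envctl_engine/planning") (pvMatch rp "python/envctl_engine/requirements") (pvMatch rp "python/envctl_engine/runtime") (pvMatch rp "python/envctl_engine/shared") (pvMatch rp "python/envctl_engine/shell") (pvMatch rp "python/envctl_engine/startup") (pvMatch rp "python/envctl_engine/state") (pvMatch rp "python/envctl_engine/test_output") (pvMatch rp "python/envctl_engine/ui") (pvMatch rp "python/envctl_engine") (pvMatch rp "python") := by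
  unfold best_source_test_dir_py_alt pvFB
  rw [pvSorted_eq]
  simp only [pvFirstMatch]

-- ===== VERDICT (by name: the statement is the Claim_ definition above) =====
theorem best_source_test_dir_py_spec : Claim_equal_best_source_test_dir_py := by
  intro rp _
  unfold Spec_best_source_test_dir_py
  rw [pvA_eq, pvB_eq]
  apply pvKeyLemma
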